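-- pv_equiv track=rewrite | github.com/lychanl/discord-text-rpg | code/dtrpg/utils/string_difference.py | difference_with_wildcards
-- ===== SOURCE A (Python) =====
-- def difference_with_wildcards(str1: str, str2: str) -> int:
--     WILDCARD = '*'
--     # assuming only * wildcard for 1:n matching
--     dynamic_array = [[None for _ in range(len(str1) + 1)] for _ in range(len(str2) + 1)]
--
--     for i in range(len(str1) + 1):
--         dynamic_array[0][i] = i
--
--     for i in range(1, len(str2) + 1):
--         dynamic_array[i][0] = i
--
--     for i, e2 in enumerate(str2):
--         for j, e1 in enumerate(str1):
--             replacement_cost = int(e1 != WILDCARD and e2 != WILDCARD and e1 != e2)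
--             add1_cost = int(e1 != WILDCARD)
--             add2_cost = int(e2 != WILDCARD)
--
--             dynamic_array[i + 1][j + 1] = min(
--                 dynamic_array[i][j] + replacement_cost,
--                 dynamic_array[i][j + 1] + add1_cost,
--                 dynamic_array[i + 1][j] + add2_cost,
--             )
--
--     return dynamic_array[-1][-1]
-- ===== SOURCE B (Python) =====
-- def difference_with_wildcards(str1: str, str2: str) -> int:
--     # Top-down memoized recursion over remaining prefix lengths (i of str2, j of str1)
--     # instead of A's bottom-up 2D table; the cache is keyed on the flat index
--     # i * (len(str1) + 1) + j.
--     WILDCARD = '*'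
--     n1 = len(str1)
--     memo = {}
--     get = memo.get
--
--     def f(i, j):
--         key = i * (n1 + 1) + j
--         r = get(key)
--         if r is not None:
--             return r
--         if i == 0:
--             r = j
--         elif j == 0:
--             r = i
--         else:
--             e1 = str1[j - 1]
--             e2 = str2[i - 1]
--             r = min(f(i - 1, j - 1) + (e1 != WILDCARD and e2 != WILDCARD and e1 != e2),
--                     f(i - 1, j) + (e1 != WILDCARD),
--                     f(i, j - 1) + (e2 != WILDCARD))
--         memo[key] = r
--         return r
--
--     return f(len(str2), n1)
-- ===== Notes on version B (the rewrite author's own statement) =====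
-- stated objective: alternative
-- what changed: Replaces A's bottom-up 2D dynamic-programming table filled row by row with a top-down memoized recursion f(i, j) over remaining prefix lengths, caching results in a dict keyed on a flat index; equivalence is proved via a shared characterisation of the DP cell values.
import Mathlib
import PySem

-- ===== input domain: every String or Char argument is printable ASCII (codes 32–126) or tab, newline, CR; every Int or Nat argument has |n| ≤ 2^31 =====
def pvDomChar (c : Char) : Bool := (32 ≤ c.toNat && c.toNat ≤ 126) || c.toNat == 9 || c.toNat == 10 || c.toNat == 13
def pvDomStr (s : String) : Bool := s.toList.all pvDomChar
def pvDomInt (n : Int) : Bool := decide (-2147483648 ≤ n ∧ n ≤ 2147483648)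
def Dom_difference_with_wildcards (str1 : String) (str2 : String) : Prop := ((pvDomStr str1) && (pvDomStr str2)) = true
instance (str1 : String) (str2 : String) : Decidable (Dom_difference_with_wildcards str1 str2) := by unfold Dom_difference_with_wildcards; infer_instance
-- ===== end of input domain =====

-- B replaces A's bottom-up 2D DP table with a top-down memoized recursion over
-- remaining prefix lengths, caching results in a dict; objective: alternative.

-- ===== PORT A =====
-- A mutates a 2D list in place row by row; the port builds row i+1 from row i with a
-- left fold (rev-accumulated, head = cell just filled) and keeps the list of all rows,
-- returning dynamic_array[-1][-1] as the last element of the last row.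
def pvRowStepA (l1 : List Char) (prev : List Int) (i : Nat) (e2 : Char) : List Int :=
  (l1.foldl (fun (st : List Int × Nat) e1 =>
      let rev := st.1
      let j := st.2
      let rep : Int := if e1 ≠ '*' ∧ e2 ≠ '*' ∧ e1 ≠ e2 then 1 else 0
      let add1 : Int := if e1 ≠ '*' then 1 else 0
      let add2 : Int := if e2 ≠ '*' then 1 else 0
      let v := min (min (prev.getD j 0 + rep) (prev.getD (j + 1) 0 + add1))
                   (rev.headD 0 + add2)
      (v :: rev, j + 1)) ([((i : Int) + 1)], 0)).1.reverse

def difference_with_wildcards (str1 : String) (str2 : String) : Int :=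
  let l1 := str1.toList
  let l2 := str2.toList
  let row0 : List Int := (List.range (l1.length + 1)).map (fun j => Int.ofNat j)
  let st := l2.foldl (fun (st : List (List Int) × Nat) e2 =>
      let tableRev := st.1
      let i := st.2
      (pvRowStepA l1 (tableRev.headD []) i e2 :: tableRev, i + 1)) ([row0], 0)
  ((st.1.headD []).getLast?).getD 0

-- ===== PORT B =====
-- B's memo dict (keyed on the flat index i * (n1 + 1) + j) is threaded through the
-- recursion as an explicit PySem.Dict; f returns (value, updated memo).  The
-- recursion is made structural with a fuel argument (= i + j at the top call,
-- enough since i + j drops by at least 1 per call); the fuel-exhausted branch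
-- is unreachable and only makes the same computation total.
def pvMemoF (l1 l2 : List Char) (n1 fuel i j : Nat) (memo : PySem.Dict Nat Int) :
    Int × PySem.Dict Nat Int :=
  let key := i * (n1 + 1) + j
  if memo.contains key then (memo.getD key 0, memo)
  else if i = 0 then ((j : Int), memo.insert key (j : Int))
  else if j = 0 then ((i : Int), memo.insert key (i : Int))
  else
    match fuel with
    | 0 => (0, memo)  -- unreachable when i + j ≤ fuel
    | fuel + 1 =>
      let e1 := l1.getD (j - 1) ' '
      let e2 := l2.getD (i - 1) ' '
      let r1 := pvMemoF l1 l2 n1 fuel (i - 1) (j - 1) memo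
      let r2 := pvMemoF l1 l2 n1 fuel (i - 1) j r1.2
      let r3 := pvMemoF l1 l2 n1 fuel i (j - 1) r2.2
      let r := min (min (r1.1 + if e1 ≠ '*' ∧ e2 ≠ '*' ∧ e1 ≠ e2 then 1 else 0)
                        (r2.1 + if e1 ≠ '*' then 1 else 0))
                   (r3.1 + if e2 ≠ '*' then 1 else 0)
      (r, r3.2.insert key r)

def difference_with_wildcards_alt (str1 : String) (str2 : String) : Int :=
  (pvMemoF str1.toList str2.toList str1.toList.length
    (str2.toList.length + str1.toList.length)
    str2.toList.length str1.toList.length PySem.Dict.empty).1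

-- ===== PRECONDITION & SPEC =====
def Spec_difference_with_wildcards (str1 : String) (str2 : String) (out : Int) : Prop := out = difference_with_wildcards_alt str1 str2
instance (str1 : String) (str2 : String) (out : Int) : Decidable (Spec_difference_with_wildcards str1 str2 out) := by unfold Spec_difference_with_wildcards; infer_instance

-- ===== CLAIM (what is proved, stated in full; the proofs are below) =====
def Claim_equal_difference_with_wildcards : Prop := ∀ (str1 : String) (str2 : String), Dom_difference_with_wildcards str1 str2 → Spec_difference_with_wildcards str1 str2 (difference_with_wildcards str1 str2)


-- ===== LEMMAS AND PROOFS =====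

-- the mathematical table both programs compute: ed l1 l2 i j = cell [i][j]
def ed (l1 l2 : List Char) : Nat → Nat → Int
  | 0, j => (j : Int)
  | i + 1, 0 => ((i : Int) + 1)
  | i + 1, j + 1 =>
    let e2 := l2.getD i ' '
    let e1 := l1.getD j ' '
    let rep : Int := if e1 ≠ '*' ∧ e2 ≠ '*' ∧ e1 ≠ e2 then 1 else 0
    let add1 : Int := if e1 ≠ '*' then 1 else 0
    let add2 : Int := if e2 ≠ '*' then 1 else 0
    min (min (ed l1 l2 i j + rep) (ed l1 l2 i (j + 1) + add1)) (ed l1 l2 (i + 1) j + add2)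

def rowOf (l1 l2 : List Char) (i : Nat) : List Int :=
  (List.range (l1.length + 1)).map (fun j => ed l1 l2 i j)

theorem mapRange_getD (f : Nat → Int) (n k : Nat) (hk : k < n) :
    ((List.range n).map f).getD k 0 = f k := by
  rw [List.getD_eq_getElem?_getD]
  simp [hk]

theorem revMap_head (f : Nat → Int) (n : Nat) :
    (((List.range (n + 1)).map f).reverse).headD 0 = f n := by
  simp [List.range_succ]

theorem revMap_cons (f : Nat → Int) (n : Nat) :
    ((List.range (n + 1)).map f).reverse = f n :: ((List.range n).map f).reverse := by
  simp [List.range_succ]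

theorem drop_head (l : List Char) (j : Nat) (e : Char) (s : List Char)
    (h : l.drop j = e :: s) : l.getD j ' ' = e := by
  have h0 : (l.drop j)[0]? = some e := by rw [h]; rfl
  rw [List.getElem?_drop] at h0
  have h0' : l[j]? = some e := by simpa using h0
  simp [List.getD_eq_getElem?_getD, h0']

theorem drop_tail (l : List Char) (j : Nat) (e : Char) (s : List Char)
    (h : l.drop j = e :: s) : l.drop (j + 1) = s := by
  have : (l.drop j).tail = l.drop (j + 1) := by rw [List.tail_drop]
  rw [h] at this
  exact this.symm

theorem ed_zero (l1 l2 : List Char) (j : Nat) : ed l1 l2 0 j = (j : Int) := by rw [ed]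

theorem ed_succ_zero (l1 l2 : List Char) (i : Nat) : ed l1 l2 (i + 1) 0 = ((i : Int) + 1) := by rw [ed]

theorem ed_succ_succ (l1 l2 : List Char) (i j : Nat) :
    ed l1 l2 (i + 1) (j + 1) =
      min (min (ed l1 l2 i j + (if l1.getD j ' ' ≠ '*' ∧ l2.getD i ' ' ≠ '*' ∧ l1.getD j ' ' ≠ l2.getD i ' ' then 1 else 0))
               (ed l1 l2 i (j + 1) + (if l1.getD j ' ' ≠ '*' then 1 else 0)))
          (ed l1 l2 (i + 1) j + (if l2.getD i ' ' ≠ '*' then 1 else 0)) := by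
  rw [ed]

theorem rowOf_zero (l1 l2 : List Char) :
    (List.range (l1.length + 1)).map (fun j => Int.ofNat j) = rowOf l1 l2 0 := by
  unfold rowOf
  exact List.map_congr_left (fun a _ => (ed_zero l1 l2 a).symm)

theorem rowStepA_inner (l1 l2 : List Char) (i : Nat) (e2 : Char) (he2 : l2.getD i ' ' = e2) :
    ∀ (s : List Char) (j : Nat) (rev : List Int),
      l1.drop j = s → j + s.length = l1.length →
      rev = ((List.range (j + 1)).map (fun j' => ed l1 l2 (i + 1) j')).reverse →
      ((s.foldl (fun (st : List Int × Nat) e1 =>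
          let rev := st.1
          let j := st.2
          let rep : Int := if e1 ≠ '*' ∧ e2 ≠ '*' ∧ e1 ≠ e2 then 1 else 0
          let add1 : Int := if e1 ≠ '*' then 1 else 0
          let add2 : Int := if e2 ≠ '*' then 1 else 0
          let v := min (min ((rowOf l1 l2 i).getD j 0 + rep) ((rowOf l1 l2 i).getD (j + 1) 0 + add1))
                       (rev.headD 0 + add2)
          (v :: rev, j + 1)) (rev, j)).1)
        = ((List.range (l1.length + 1)).map (fun j' => ed l1 l2 (i + 1) j')).reverse := by
  intro s
  induction s with
  | nil =>
    intro j rev hdrop hlen hrev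
    simp only [List.length_nil, Nat.add_zero] at hlen
    subst hlen
    simpa using hrev
  | cons e1 s' ih =>
    intro j rev hdrop hlen hrev
    have hj : j < l1.length := by
      simp only [List.length_cons] at hlen; omega
    have he1 : l1.getD j ' ' = e1 := drop_head l1 j e1 s' hdrop
    rw [List.foldl_cons]
    have hv : min (min ((rowOf l1 l2 i).getD j 0 +
          (if e1 ≠ '*' ∧ e2 ≠ '*' ∧ e1 ≠ e2 then (1 : Int) else 0))
          ((rowOf l1 l2 i).getD (j + 1) 0 + (if e1 ≠ '*' then (1 : Int) else 0)))
          (rev.headD 0 + (if e2 ≠ '*' then (1 : Int) else 0)) = ed l1 l2 (i + 1) (j + 1) := by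
      rw [ed_succ_succ, he1, he2]
      unfold rowOf
      rw [mapRange_getD _ _ _ (by omega), mapRange_getD _ _ _ (by omega), hrev, revMap_head]
    refine ih (j + 1) _ (drop_tail l1 j e1 s' hdrop) (by simp at hlen ⊢; omega) ?_
    rw [revMap_cons]
    simp only []
    rw [hv, hrev]

theorem rowStepA_spec (l1 l2 : List Char) (i : Nat) (e2 : Char) (he2 : l2.getD i ' ' = e2) :
    pvRowStepA l1 (rowOf l1 l2 i) i e2 = rowOf l1 l2 (i + 1) := by
  unfold pvRowStepA
  rw [rowStepA_inner l1 l2 i e2 he2 l1 0 _ rfl (by simp) (by simp [List.range_succ, ed_succ_zero])]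
  simp [rowOf]

theorem tableA_spec (l1 l2 : List Char) :
    ∀ (s : List Char) (i : Nat) (tr : List (List Int)),
      l2.drop i = s → tr.headD [] = rowOf l1 l2 i →
      ((s.foldl (fun (st : List (List Int) × Nat) e2 =>
          let tableRev := st.1
          let i := st.2
          (pvRowStepA l1 (tableRev.headD []) i e2 :: tableRev, i + 1)) (tr, i)).1.headD [])
        = rowOf l1 l2 (i + s.length) := by
  intro s
  induction s with
  | nil => intro i tr _ htr; simpa using htr
  | cons e2 s' ih =>
    intro i tr hdrop htr
    rw [List.foldl_cons]
    have : i + (e2 :: s').length = (i + 1) + s'.length := by simp; omega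
    rw [this]
    refine ih (i + 1) _ (drop_tail l2 i e2 s' hdrop) ?_
    simp only [List.headD_cons]
    rw [htr, rowStepA_spec l1 l2 i e2 (drop_head l2 i e2 s' hdrop)]

theorem rowOf_last (l1 l2 : List Char) (i : Nat) :
    ((rowOf l1 l2 i).getLast?).getD 0 = ed l1 l2 i l1.length := by
  simp [rowOf, List.range_succ]

theorem A_result (str1 str2 : String) :
    difference_with_wildcards str1 str2 = ed str1.toList str2.toList str2.toList.length str1.toList.length := by
  unfold difference_with_wildcards
  simp only []
  rw [tableA_spec str1.toList str2.toList str2.toList 0 _ rfl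
      (by simp only [List.headD_cons]; exact rowOf_zero _ _)]
  simp only [Nat.zero_add]
  exact rowOf_last _ _ _

-- B-side: the memo invariant — every cached entry is the corresponding ed value
def MemoOK (l1 l2 : List Char) (n1 : Nat) (d : PySem.Dict Nat Int) : Prop :=
  ∀ k v, d.get? k = some v → v = ed l1 l2 (k / (n1 + 1)) (k % (n1 + 1))

theorem key_div (n1 i j : Nat) (hj : j ≤ n1) : (i * (n1 + 1) + j) / (n1 + 1) = i := by
  rw [mul_comm, Nat.mul_add_div (by omega), Nat.div_eq_of_lt (by omega)]
  omega

theorem key_mod (n1 i j : Nat) (hj : j ≤ n1) : (i * (n1 + 1) + j) % (n1 + 1) = j := by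
  rw [mul_comm, Nat.mul_add_mod]
  exact Nat.mod_eq_of_lt (by omega)

theorem memoOK_insert (l1 l2 : List Char) (n1 : Nat) (d : PySem.Dict Nat Int)
    (i j : Nat) (hj : j ≤ n1) (r : Int) (hd : MemoOK l1 l2 n1 d) (hr : r = ed l1 l2 i j) :
    MemoOK l1 l2 n1 (d.insert (i * (n1 + 1) + j) r) := by
  intro k v hget
  rw [PySem.Dict.get?_insert] at hget
  split at hget
  · rename_i hk
    cases hget
    subst hk
    rw [key_div n1 i j hj, key_mod n1 i j hj]
    exact hr
  · exact hd k v hget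

theorem memoOK_value (l1 l2 : List Char) (n1 : Nat) (d : PySem.Dict Nat Int)
    (i j : Nat) (hj : j ≤ n1) (hc : d.contains (i * (n1 + 1) + j) = true)
    (hd : MemoOK l1 l2 n1 d) :
    d.getD (i * (n1 + 1) + j) 0 = ed l1 l2 i j := by
  rw [PySem.Dict.contains_eq_isSome_get?] at hc
  obtain ⟨v, hv⟩ := Option.isSome_iff_exists.mp hc
  rw [PySem.Dict.getD_eq_get?_getD, hv]
  have := hd _ v hv
  rwa [key_div n1 i j hj, key_mod n1 i j hj] at this

theorem ed_of_j_zero (l1 l2 : List Char) (i : Nat) : ed l1 l2 i 0 = (i : Int) := by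
  cases i with
  | zero => rw [ed_zero]
  | succ i' => rw [ed_succ_zero]; push_cast; ring

theorem pvMemoF_spec (l1 l2 : List Char) (n1 : Nat) :
    ∀ (fuel i j : Nat) (d : PySem.Dict Nat Int), i + j ≤ fuel → j ≤ n1 → MemoOK l1 l2 n1 d →
      (pvMemoF l1 l2 n1 fuel i j d).1 = ed l1 l2 i j ∧
        MemoOK l1 l2 n1 (pvMemoF l1 l2 n1 fuel i j d).2 := by
  intro fuel
  induction fuel with
  | zero =>
    intro i j d hle hj hd
    have hi : i = 0 := by omega
    have hj0 : j = 0 := by omega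
    subst hi; subst hj0
    rw [pvMemoF]
    by_cases hc : d.contains (0 * (n1 + 1) + 0) = true
    · rw [if_pos hc]
      exact ⟨memoOK_value l1 l2 n1 d 0 0 hj hc hd, hd⟩
    · rw [if_neg hc, if_pos rfl]
      exact ⟨(ed_zero l1 l2 0).symm,
        memoOK_insert l1 l2 n1 d 0 0 hj _ hd (ed_zero l1 l2 0).symm⟩
  | succ m ih =>
    intro i j d hle hj hd
    rw [pvMemoF]
    by_cases hc : d.contains (i * (n1 + 1) + j) = true
    · rw [if_pos hc]
      exact ⟨memoOK_value l1 l2 n1 d i j hj hc hd, hd⟩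
    · rw [if_neg hc]
      by_cases hi : i = 0
      · rw [if_pos hi]
        subst hi
        exact ⟨(ed_zero l1 l2 j).symm,
          memoOK_insert l1 l2 n1 d 0 j hj _ hd (ed_zero l1 l2 j).symm⟩
      · by_cases hj0 : j = 0
        · rw [if_neg hi, if_pos hj0]
          subst hj0
          exact ⟨(ed_of_j_zero l1 l2 i).symm,
            memoOK_insert l1 l2 n1 d i 0 hj _ hd (ed_of_j_zero l1 l2 i).symm⟩
        · rw [if_neg hi, if_neg hj0]
          obtain ⟨i', rfl⟩ := Nat.exists_eq_succ_of_ne_zero hi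
          obtain ⟨j', rfl⟩ := Nat.exists_eq_succ_of_ne_zero hj0
          simp only [Nat.succ_sub_one]
          obtain ⟨h1v, h1m⟩ := ih i' j' d (by omega) (by omega) hd
          obtain ⟨h2v, h2m⟩ := ih i' (j' + 1) _ (by omega) hj h1m
          obtain ⟨h3v, h3m⟩ := ih (i' + 1) j' _ (by omega) (by omega) h2m
          refine ⟨?_, memoOK_insert l1 l2 n1 _ (i' + 1) (j' + 1) hj _ h3m ?_⟩ <;>
            · simp only [h1v, h2v, h3v, ed_succ_succ]
              rfl

theorem B_result (str1 str2 : String) :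
    difference_with_wildcards_alt str1 str2 = ed str1.toList str2.toList str2.toList.length str1.toList.length := by
  unfold difference_with_wildcards_alt
  exact (pvMemoF_spec str1.toList str2.toList str1.toList.length
    (str2.toList.length + str1.toList.length)
    str2.toList.length str1.toList.length PySem.Dict.empty (by omega) (le_refl _)
    (fun k v h => by simp [PySem.Dict.get?_empty] at h)).1

-- ===== VERDICT (by name: the statement is the Claim_ definition above) =====
theorem difference_with_wildcards_spec : Claim_equal_difference_with_wildcards := by
  intro str1 str2 _
  unfold Spec_difference_with_wildcards
  rw [A_result, B_result]
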